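-- pv_equiv track=rewrite | github.com/mahmood726-cyber/rct-extractor-v2 | scripts/build_cardiology_adjudication_workplan.py | _batch_counts
-- ===== SOURCE A (Python) =====
-- from typing import Dict, Iterable, List, Optional, Sequence, Tuple
--
-- def _batch_counts(rows: Sequence[Dict]) -> Dict[str, Dict[str, int]]:
--     out: Dict[str, Dict[str, int]] = {}
--     for row in rows:
--         batch_id = str(row.get("batch_id") or "")
--         status = str(row.get("status_snapshot") or "")
--         out.setdefault(batch_id, {})
--         out[batch_id][status] = out[batch_id].get(status, 0) + 1
--     return dict(sorted(out.items(), key=lambda kv: kv[0]))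
-- ===== SOURCE B (Python) =====
-- def _batch_counts(rows):
--     # Sort the (batch_id, status) pairs once (stable), then scan runs of equal
--     # batch_id with two indices and count each run's statuses by dedup + count.
--     pairs = sorted(
--         ((str(row.get("batch_id") or ""), str(row.get("status_snapshot") or "")) for row in rows),
--         key=lambda p: p[0],
--     )
--     out = {}
--     i = 0
--     n = len(pairs)
--     while i < n:
--         batch_id = pairs[i][0]
--         j = i
--         while j < n and pairs[j][0] == batch_id:
--             j += 1
--         statuses = [s for _, s in pairs[i:j]]
--         out[batch_id] = {s: statuses.count(s) for s in dict.fromkeys(statuses)}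
--         i = j
--     return out
-- ===== Notes on version B (the rewrite author's own statement) =====
-- stated objective: alternative
-- what changed: Replaces A's hash-accumulate into a dict-of-dicts followed by a final sort with: build the (batch,status) pair list, stable-sort it once by batch, scan runs of equal batch with two indices, and count each run's statuses by dedup-then-count; the output is assembled directly in sorted order.
import Mathlib
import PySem

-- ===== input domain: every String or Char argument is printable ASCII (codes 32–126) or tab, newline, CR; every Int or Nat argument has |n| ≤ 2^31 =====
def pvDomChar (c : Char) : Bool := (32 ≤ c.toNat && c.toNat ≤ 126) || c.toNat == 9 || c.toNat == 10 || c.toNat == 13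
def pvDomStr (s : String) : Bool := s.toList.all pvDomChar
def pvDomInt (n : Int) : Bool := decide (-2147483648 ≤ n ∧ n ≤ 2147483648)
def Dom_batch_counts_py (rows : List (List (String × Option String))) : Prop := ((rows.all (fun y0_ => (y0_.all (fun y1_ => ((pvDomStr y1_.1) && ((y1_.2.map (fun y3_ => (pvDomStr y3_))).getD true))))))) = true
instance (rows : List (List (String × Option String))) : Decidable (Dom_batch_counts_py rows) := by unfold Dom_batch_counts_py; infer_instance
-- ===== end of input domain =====

-- B replaces A's hash-accumulate dict-of-dicts + final sort by: stable-sort the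
-- (batch,status) pairs once by batch, scan runs of equal batch, count each run's
-- statuses by dedup-then-count (alternative decomposition; same results).


-- ===== PORT A =====
-- shared accessor: str(row.get(k) or "")  (None / missing / "" all give "")
def pyStrGet (row : List (String × Option String)) (k : String) : String :=
  match (PySem.Dict.mk row).get? k with
  | some (some s) => s
  | _ => ""

def batch_counts_py (rows : List (List (String × Option String))) : List (String × List (String × Int)) :=
  let out : PySem.Dict String (PySem.Dict String Int) :=
    rows.foldl (fun out row =>
      let batch_id := pyStrGet row "batch_id"
      let status := pyStrGet row "status_snapshot"
      let out := out.setdefault batch_id PySem.Dict.empty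
      let inner := out.getD batch_id PySem.Dict.empty
      out.insert batch_id (inner.insert status (inner.getD status 0 + 1)))
      PySem.Dict.empty
  (PySem.List.sorted out.items (fun kv => kv.1) false).map (fun kv => (kv.1, kv.2.items))

-- ===== PORT B =====
-- the run-scanning while loop: one entry (batch, statuses-of-run) per run of equal fst
def runsB : List (String × String) → List (String × List String)
  | [] => []
  | p :: t =>
    let run := t.takeWhile (fun q => q.1 == p.1)
    let rest := t.dropWhile (fun q => q.1 == p.1)
    (p.1, (p :: run).map (fun q => q.2)) :: runsB rest
termination_by l => l.length
decreasing_by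
  simp only [List.length_cons]
  exact Nat.lt_succ_of_le (List.length_dropWhile_le _ _)

def batch_counts_py_alt (rows : List (List (String × Option String))) : List (String × List (String × Int)) :=
  let pairs := rows.map (fun row => (pyStrGet row "batch_id", pyStrGet row "status_snapshot"))
  let sp := PySem.List.sorted pairs (fun p => p.1) false
  (runsB sp).map (fun g =>
    (g.1, (PySem.Set.ofList g.2).map (fun s => (s, (g.2.count s : Int)))))

-- ===== PRECONDITION & SPEC =====
def Spec_batch_counts_py (rows : List (List (String × Option String))) (out : List (String × List (String × Int))) : Prop := out = batch_counts_py_alt rows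
instance (rows : List (List (String × Option String))) (out : List (String × List (String × Int))) : Decidable (Spec_batch_counts_py rows out) := by unfold Spec_batch_counts_py; infer_instance

-- ===== CLAIM (what is proved, stated in full; the proofs are below) =====
def Claim_equal_batch_counts_py : Prop := ∀ (rows : List (List (String × Option String))), Dom_batch_counts_py rows → Spec_batch_counts_py rows (batch_counts_py rows)

-- ===== LEMMAS AND PROOFS =====

-- ---- stability of PySem.List.sorted under filtering by a fixed key value ----

theorem insertBy_nil_eq (bf : (String × String) → (String × String) → Bool) (x : String × String) :
    PySem.List.insertBy bf x [] = [x] := rfl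

theorem insertBy_cons_eq (bf : (String × String) → (String × String) → Bool)
    (x y : String × String) (ys : List (String × String)) :
    PySem.List.insertBy bf x (y :: ys) =
      if bf x y then x :: y :: ys else y :: PySem.List.insertBy bf x ys := rfl

theorem insertBy_pairwise (x : String × String) (acc : List (String × String))
    (h : acc.Pairwise (fun a c => a.1 ≤ c.1)) :
    (PySem.List.insertBy (fun a c => decide (a.1 < c.1)) x acc).Pairwise (fun a c => a.1 ≤ c.1) := by
  induction acc with
  | nil => rw [insertBy_nil_eq]; simp
  | cons y ys ih =>
    rw [List.pairwise_cons] at h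
    rw [insertBy_cons_eq]
    by_cases hb : x.1 < y.1
    · rw [if_pos (by simpa using hb)]
      refine List.Pairwise.cons ?_ (List.Pairwise.cons h.1 h.2)
      intro z hz
      rcases List.mem_cons.mp hz with rfl | hz
      · exact le_of_lt hb
      · exact le_trans (le_of_lt hb) (h.1 z hz)
    · rw [if_neg (by simpa using hb)]
      refine List.Pairwise.cons ?_ (ih h.2)
      intro z hz
      rcases (PySem.List.mem_insertBy _ _ _ _).mp hz with rfl | hz
      · exact le_of_not_gt hb
      · exact h.1 z hz

theorem filter_insertBy (b : String) (x : String × String) (acc : List (String × String))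
    (h : acc.Pairwise (fun a c => a.1 ≤ c.1)) :
    (PySem.List.insertBy (fun a c => decide (a.1 < c.1)) x acc).filter (fun p => p.1 == b) =
      if x.1 = b then acc.filter (fun p => p.1 == b) ++ [x] else acc.filter (fun p => p.1 == b) := by
  induction acc with
  | nil =>
    rw [insertBy_nil_eq]
    by_cases hx : x.1 = b <;> simp [hx]
  | cons y ys ih =>
    rw [List.pairwise_cons] at h
    rw [insertBy_cons_eq]
    by_cases hb : x.1 < y.1
    · rw [if_pos (by simpa using hb)]
      by_cases hx : x.1 = b
      · have hnil : (y :: ys).filter (fun p => p.1 == b) = [] := by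
          rw [List.filter_eq_nil_iff]
          intro z hz
          have hyz : y.1 ≤ z.1 := by
            rcases List.mem_cons.mp hz with rfl | hz
            · exact le_refl _
            · exact h.1 z hz
          simp only [beq_iff_eq]
          intro hzb
          exact absurd (lt_of_lt_of_le hb hyz) (by rw [hzb, hx]; exact lt_irrefl b)
        rw [List.filter_cons, if_pos (by simpa using hx), hnil, if_pos hx]
        simp
      · rw [List.filter_cons, if_neg (by simpa using hx), if_neg hx]
    · rw [if_neg (by simpa using hb)]
      rw [List.filter_cons, List.filter_cons, ih h.2]
      by_cases hy : y.1 = b <;> by_cases hx : x.1 = b <;>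
        simp [hy, hx]

theorem filter_foldl_insertBy (b : String) (xs acc : List (String × String))
    (h : acc.Pairwise (fun a c => a.1 ≤ c.1)) :
    ((xs.foldl (fun a x => PySem.List.insertBy (fun a c => decide (a.1 < c.1)) x a) acc).filter
        (fun p => p.1 == b)) =
      acc.filter (fun p => p.1 == b) ++ xs.filter (fun p => p.1 == b) := by
  induction xs generalizing acc with
  | nil => simp
  | cons x t ih =>
    rw [List.foldl_cons, ih _ (insertBy_pairwise x acc h),
      filter_insertBy b x acc h, List.filter_cons]
    by_cases hx : x.1 = b
    · rw [if_pos hx, if_pos (by simpa using hx)]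
      simp
    · rw [if_neg hx, if_neg (by simpa using hx)]

theorem sorted_filter_stable (b : String) (xs : List (String × String)) :
    (PySem.List.sorted xs (fun p => p.1) false).filter (fun p => p.1 == b) =
      xs.filter (fun p => p.1 == b) := by
  rw [PySem.List.sorted_eq_foldl_insertBy, filter_foldl_insertBy b xs [] (by simp)]
  simp

-- ---- characterisation of runsB on a list sorted by first component ----

theorem runsB_nil : runsB [] = [] := by rw [runsB]

theorem runsB_cons (p : String × String) (t : List (String × String)) :
    runsB (p :: t) =
      (p.1, (p :: t.takeWhile (fun q => q.1 == p.1)).map (fun q => q.2)) ::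
        runsB (t.dropWhile (fun q => q.1 == p.1)) := by
  rw [runsB]

theorem run_rest (p : String × String) (t : List (String × String))
    (hle : ∀ z ∈ t, p.1 ≤ z.1) (hp : t.Pairwise (fun a c => a.1 ≤ c.1)) :
    (∀ q ∈ t.takeWhile (fun q => q.1 == p.1), q.1 = p.1) ∧
      (∀ q ∈ t.dropWhile (fun q => q.1 == p.1), p.1 < q.1) := by
  induction t with
  | nil => simp
  | cons z t' ih =>
    rw [List.pairwise_cons] at hp
    by_cases hz : z.1 = p.1
    · rw [List.takeWhile_cons, List.dropWhile_cons]
      simp only [hz, beq_self_eq_true, if_pos]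
      have := ih (fun w hw => hle w (List.mem_cons_of_mem _ hw)) hp.2
      exact ⟨fun q hq => by
          rcases List.mem_cons.mp hq with rfl | hq
          · exact hz
          · exact this.1 q hq,
        this.2⟩
    · have hb : (z.1 == p.1) = false := by simpa using hz
      rw [List.takeWhile_cons, List.dropWhile_cons, hb]
      simp only [Bool.false_eq_true, if_false]
      refine ⟨by simp, ?_⟩
      intro q hq
      have hpz : p.1 < z.1 := lt_of_le_of_ne (hle z List.mem_cons_self) (Ne.symm hz)
      rcases List.mem_cons.mp hq with rfl | hq
      · exact hpz
      · exact lt_of_lt_of_le hpz (hp.1 q hq)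

theorem runsB_keys_mem (l : List (String × String)) (b : String) :
    b ∈ (runsB l).map (fun g => g.1) ↔ b ∈ l.map (fun q => q.1) := by
  induction hn : l.length using Nat.strong_induction_on generalizing l with
  | _ n IH =>
  match l, hn with
  | [], _ => simp [runsB_nil]
  | p :: t, hn =>
    have ih := IH (t.dropWhile (fun q => q.1 == p.1)).length
      (by rw [← hn]; simp only [List.length_cons]; exact Nat.lt_succ_of_le (List.length_dropWhile_le _ _)) _ rfl
    rw [runsB_cons]
    simp only [List.map_cons, List.mem_cons] at *
    rw [ih]
    constructor
    · rintro (rfl | hb)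
      · exact Or.inl rfl
      · rcases List.mem_map.mp hb with ⟨q, hq, rfl⟩
        exact Or.inr (List.mem_map.mpr ⟨q, (List.dropWhile_sublist _).subset hq, rfl⟩)
    · rintro (rfl | hb)
      · exact Or.inl rfl
      · rcases List.mem_map.mp hb with ⟨q, hq, rfl⟩
        by_cases hqb : q.1 = p.1
        · exact Or.inl hqb
        · have hq' : q ∈ t.takeWhile (fun q => q.1 == p.1) ++ t.dropWhile (fun q => q.1 == p.1) := by
            rw [List.takeWhile_append_dropWhile]; exact hq
          rcases List.mem_append.mp hq' with h1 | h2
          · exact absurd (by simpa using List.mem_takeWhile_imp h1) hqb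
          · exact Or.inr (List.mem_map.mpr ⟨q, h2, rfl⟩)

theorem runsB_sorted_spec (l : List (String × String))
    (hp : l.Pairwise (fun a c => a.1 ≤ c.1)) :
    runsB l =
      ((runsB l).map (fun g => g.1)).map
        (fun b => (b, (l.filter (fun q => q.1 == b)).map (fun q => q.2))) ∧
      ((runsB l).map (fun g => g.1)).Pairwise (fun a c => a < c) := by
  induction hn : l.length using Nat.strong_induction_on generalizing l with
  | _ n IH =>
  match l, hp, hn with
  | [], _, _ => rw [runsB_nil]; simp
  | p :: t, hp, hn =>
    rw [List.pairwise_cons] at hp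
    have hrr := run_rest p t hp.1 hp.2
    have hrest_pw : (t.dropWhile (fun q => q.1 == p.1)).Pairwise
        (fun a c : String × String => a.1 ≤ c.1) :=
      hp.2.sublist (List.dropWhile_sublist _)
    obtain ⟨ih1, ih2⟩ := IH (t.dropWhile (fun q => q.1 == p.1)).length
      (by rw [← hn]; simp only [List.length_cons]; exact Nat.lt_succ_of_le (List.length_dropWhile_le _ _)) _ hrest_pw rfl
    have hkeygt : ∀ b ∈ (runsB (t.dropWhile (fun q => q.1 == p.1))).map (fun g => g.1), p.1 < b := by
      intro b hb
      rcases List.mem_map.mp ((runsB_keys_mem _ b).mp hb) with ⟨q, hq, rfl⟩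
      exact hrr.2 q hq
    have hheadfilter : (p :: t).filter (fun q => q.1 == p.1)
        = p :: t.takeWhile (fun q => q.1 == p.1) := by
      rw [List.filter_cons, if_pos (by simp)]
      congr 1
      conv_lhs => rw [← List.takeWhile_append_dropWhile (p := fun q => (q.1 == p.1)) (l := t)]
      rw [List.filter_append]
      have h1 : (t.takeWhile fun q => q.1 == p.1).filter (fun q => q.1 == p.1)
          = t.takeWhile fun q => q.1 == p.1 :=
        List.filter_eq_self.mpr (fun q hq => by simpa using hrr.1 q hq)
      have h2 : (t.dropWhile fun q => q.1 == p.1).filter (fun q => q.1 == p.1) = [] :=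
        List.filter_eq_nil_iff.mpr (fun q hq => by simpa using ne_of_gt (hrr.2 q hq))
      rw [h1, h2, List.append_nil]
    have htailfilter : ∀ b, p.1 < b →
        (p :: t).filter (fun q => q.1 == b) = (t.dropWhile (fun q => q.1 == p.1)).filter (fun q => q.1 == b) := by
      intro b hbgt
      rw [List.filter_cons, if_neg (by simp; exact ne_of_lt hbgt)]
      conv_lhs => rw [← List.takeWhile_append_dropWhile (p := fun q => (q.1 == p.1)) (l := t)]
      rw [List.filter_append]
      have h1 : (t.takeWhile fun q => q.1 == p.1).filter (fun q => q.1 == b) = [] := by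
        refine List.filter_eq_nil_iff.mpr (fun q hq => ?_)
        have := hrr.1 q hq
        simp only [beq_iff_eq]
        rw [this]
        exact ne_of_lt hbgt
      rw [h1, List.nil_append]
    constructor
    · rw [runsB_cons]
      simp only [List.map_cons]
      congr 1
      · rw [hheadfilter]; simp
      · conv_lhs => rw [ih1]
        rw [List.map_map, List.map_map]
        refine List.map_congr_left (fun g hg => ?_)
        simp only [Function.comp]
        rw [htailfilter g.1 (hkeygt g.1 (List.mem_map.mpr ⟨g, hg, rfl⟩))]
    · rw [runsB_cons]
      simp only [List.map_cons]
      exact List.Pairwise.cons (fun b hb => hkeygt b hb) ih2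

-- ---- characterisation of A's accumulation loop ----

theorem stepA_eq_insert (d : PySem.Dict String (PySem.Dict String Int))
    (batch status : String) :
    ((d.setdefault batch PySem.Dict.empty).insert batch
      (((d.setdefault batch PySem.Dict.empty).getD batch PySem.Dict.empty).insert status
        (((d.setdefault batch PySem.Dict.empty).getD batch PySem.Dict.empty).getD status 0 + 1))) =
    d.insert batch ((d.getD batch PySem.Dict.empty).insert status
      ((d.getD batch PySem.Dict.empty).getD status 0 + 1)) := by
  rw [PySem.Dict.getD_setdefault_self]
  by_cases hc : d.contains batch
  · rw [PySem.Dict.setdefault_of_contains d _ hc]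
  · rw [PySem.Dict.setdefault_of_not_contains d _ (by simpa using hc)]
    rw [PySem.Dict.insert_insert_self]

theorem foldl_insert_getD (rows : List (List (String × Option String)))
    (d : PySem.Dict String (PySem.Dict String Int)) (b : String) :
    (rows.foldl (fun d row =>
        d.insert (pyStrGet row "batch_id")
          ((d.getD (pyStrGet row "batch_id") PySem.Dict.empty).insert (pyStrGet row "status_snapshot")
            ((d.getD (pyStrGet row "batch_id") PySem.Dict.empty).getD (pyStrGet row "status_snapshot") 0 + 1)))
      d).getD b PySem.Dict.empty =
    (((rows.map (fun row => (pyStrGet row "batch_id", pyStrGet row "status_snapshot"))).filter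
        (fun p => p.1 == b)).map (fun p => p.2)).foldl
      (fun c s => c.insert s (c.getD s 0 + 1)) (d.getD b PySem.Dict.empty) := by
  induction rows generalizing d with
  | nil => simp
  | cons row t ih =>
    rw [List.foldl_cons, ih, List.map_cons, List.filter_cons]
    by_cases hb : pyStrGet row "batch_id" = b
    · rw [if_pos (by simpa using hb)]
      rw [List.map_cons, List.foldl_cons]
      rw [PySem.Dict.getD_insert, if_pos hb.symm, hb]
    · rw [if_neg (by simpa using hb)]
      rw [PySem.Dict.getD_insert, if_neg (fun h => hb h.symm)]

-- ===== VERDICT (by name: the statement is the Claim_ definition above) =====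
theorem batch_counts_py_spec : Claim_equal_batch_counts_py := by
  intro rows _
  show batch_counts_py rows = batch_counts_py_alt rows
  have hfold :
      (fun (out : PySem.Dict String (PySem.Dict String Int)) (row : List (String × Option String)) =>
        let batch_id := pyStrGet row "batch_id"
        let status := pyStrGet row "status_snapshot"
        let out := out.setdefault batch_id PySem.Dict.empty
        let inner := out.getD batch_id PySem.Dict.empty
        out.insert batch_id (inner.insert status (inner.getD status 0 + 1))) =
      (fun (d : PySem.Dict String (PySem.Dict String Int)) (row : List (String × Option String)) =>
        d.insert (pyStrGet row "batch_id")
          ((d.getD (pyStrGet row "batch_id") PySem.Dict.empty).insert (pyStrGet row "status_snapshot")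
            ((d.getD (pyStrGet row "batch_id") PySem.Dict.empty).getD (pyStrGet row "status_snapshot") 0 + 1))) :=
    funext fun d => funext fun row => stepA_eq_insert d _ _
  have hA : batch_counts_py rows =
      (PySem.List.sorted (rows.foldl (fun d row =>
          d.insert (pyStrGet row "batch_id")
            ((d.getD (pyStrGet row "batch_id") PySem.Dict.empty).insert (pyStrGet row "status_snapshot")
              ((d.getD (pyStrGet row "batch_id") PySem.Dict.empty).getD (pyStrGet row "status_snapshot") 0 + 1)))
        PySem.Dict.empty).items (fun kv => kv.1) false).map (fun kv => (kv.1, kv.2.items)) := by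
    unfold batch_counts_py
    rw [hfold]
  have hB : batch_counts_py_alt rows =
      (runsB (PySem.List.sorted
          (rows.map (fun row => (pyStrGet row "batch_id", pyStrGet row "status_snapshot")))
          (fun p => p.1) false)).map (fun g =>
        (g.1, (PySem.Set.ofList g.2).map (fun s => (s, (g.2.count s : Int))))) := rfl
  rw [hA, hB]
  set pairs := rows.map (fun row => (pyStrGet row "batch_id", pyStrGet row "status_snapshot")) with hpairs
  set sp := PySem.List.sorted pairs (fun p => p.1) false with hsp
  set out : PySem.Dict String (PySem.Dict String Int) := rows.foldl (fun d row =>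
        d.insert (pyStrGet row "batch_id")
          ((d.getD (pyStrGet row "batch_id") PySem.Dict.empty).insert (pyStrGet row "status_snapshot")
            ((d.getD (pyStrGet row "batch_id") PySem.Dict.empty).getD (pyStrGet row "status_snapshot") 0 + 1)))
      PySem.Dict.empty with hout
  have hsp_pw : sp.Pairwise (fun a c => a.1 ≤ c.1) := PySem.List.sorted_pairwise pairs _
  obtain ⟨hruns, hKlt⟩ := runsB_sorted_spec sp hsp_pw
  set K := (runsB sp).map (fun g => g.1) with hK
  set f : String → String × PySem.Dict String Int :=
    fun b => (b, PySem.Dict.counter ((pairs.filter (fun p => p.1 == b)).map (fun p => p.2))) with hf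
  have h_keys : out.keys = PySem.Set.ofList (pairs.map (fun p => p.1)) := by
    rw [hout, PySem.Dict.keys_foldl_insert_key]
    simp [hpairs, List.map_map, PySem.Set.update_nil_left, Function.comp_def]
  have h_nodup : out.keys.Nodup := by
    rw [h_keys]; exact PySem.Set.nodup_ofList _
  have h_getD : ∀ b, out.getD b PySem.Dict.empty =
      PySem.Dict.counter ((pairs.filter (fun p => p.1 == b)).map (fun p => p.2)) := by
    intro b
    rw [hout, foldl_insert_getD, PySem.Dict.getD_empty,
      PySem.Dict.foldl_insert_getD_add_one_eq_counter]
  have h_items : out.items = (PySem.Set.ofList (pairs.map (fun p => p.1))).map f := by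
    rw [PySem.Dict.items_eq_map_keys out h_nodup PySem.Dict.empty, h_keys]
    exact List.map_congr_left (fun b _ => by rw [hf]; simp only []; rw [h_getD b])
  have hKnodup : K.Nodup := hKlt.imp ne_of_lt
  have hKperm : K.Perm (PySem.Set.ofList (pairs.map (fun p => p.1))) := by
    refine (List.perm_ext_iff_of_nodup hKnodup (PySem.Set.nodup_ofList _)).mpr (fun b => ?_)
    rw [hK, runsB_keys_mem, PySem.Set.mem_ofList]
    constructor
    · intro h
      rcases List.mem_map.mp h with ⟨q, hq, rfl⟩
      exact List.mem_map.mpr ⟨q, (PySem.List.mem_sorted pairs _ _ q).mp hq, rfl⟩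
    · intro h
      rcases List.mem_map.mp h with ⟨q, hq, rfl⟩
      exact List.mem_map.mpr ⟨q, (PySem.List.mem_sorted pairs _ _ q).mpr hq, rfl⟩
  have hsorted_items : PySem.List.sorted out.items (fun kv => kv.1) false = K.map f := by
    refine PySem.List.sorted_eq_of_perm_of_pairwise_lt out.items (K.map f) (fun kv => kv.1) ?_ ?_
    · rw [h_items]; exact hKperm.map f
    · rw [List.pairwise_map]
      exact hKlt.imp (fun h => h)
  rw [hsorted_items, hruns]
  simp only [List.map_map]
  refine List.map_congr_left (fun g _ => ?_)
  simp only [Function.comp, hf]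
  rw [PySem.Dict.items_counter, hsp, sorted_filter_stable]
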